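-- pv_equiv track=rewrite | github.com/mohr-m/aoc24 | day_9/day_9.py | defrag_memory
-- ===== SOURCE A (Python) =====
-- def defrag_memory(memory):
--     j = 0
--     for i in range(len(memory)-1, -1, -1):
--         if i < j:
--             break
--         if memory[i] != None:
--             while j+1 < i and memory[j] != None:
--                 j += 1
--             if memory[j] != None:
--                 break
--             memory[j] = memory[i]
--             memory[i] = None
--     return memory
-- ===== SOURCE B (Python) =====
-- def defrag_memory(memory):
--     gaps = [i for i, x in enumerate(memory) if x == None]
--     blocks = [i for i, x in enumerate(memory) if x != None]
--     blocks.reverse()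
--     for g, b in zip(gaps, blocks):
--         if g >= b:
--             break
--         memory[g] = memory[b]
--         memory[b] = None
--     return memory
-- ===== Notes on version B (the rewrite author's own statement) =====
-- stated objective: alternative
-- what changed: A's single interleaved right-to-left scan with an embedded left-pointer while-loop is replaced by two index-table passes (gap indices ascending, block indices descending) followed by one paired move pass over zip(gaps, blocks) that stops when the indices cross.
import Mathlib
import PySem

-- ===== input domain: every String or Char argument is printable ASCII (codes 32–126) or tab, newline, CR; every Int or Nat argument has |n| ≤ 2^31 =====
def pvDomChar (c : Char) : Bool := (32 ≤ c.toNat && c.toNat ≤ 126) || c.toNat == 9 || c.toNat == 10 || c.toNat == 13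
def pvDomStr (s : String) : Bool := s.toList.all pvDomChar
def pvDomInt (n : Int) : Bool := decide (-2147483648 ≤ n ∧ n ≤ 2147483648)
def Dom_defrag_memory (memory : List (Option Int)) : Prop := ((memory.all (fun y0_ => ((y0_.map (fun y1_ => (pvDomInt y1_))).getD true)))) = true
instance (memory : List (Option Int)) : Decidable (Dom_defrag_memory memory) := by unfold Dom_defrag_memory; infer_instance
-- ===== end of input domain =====

-- B replaces A's interleaved two-pointer scan by two index-table passes (gaps ascending,
-- blocks descending) followed by a paired move pass; objective: alternative decomposition,
-- same cost. Both Pythons mutate `memory` in place identically; the theorems are about the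
-- returned value. All list indices in both programs are provably in [0, len), so the
-- in-range total forms pyGetD/pySetD are exact ports of memory[..] read/write.

-- ===== PORT A =====
-- the inner `while j+1 < i and memory[j] != None: j += 1`
def pvAWhile (mem : List (Option Int)) (i j : Int) : Int :=
  if h : j + 1 < i ∧ PySem.List.pyGetD mem j none ≠ none then
    pvAWhile mem i (j + 1)
  else j
termination_by (i - j).toNat
decreasing_by omega

-- the `for i in range(len(memory)-1, -1, -1)` loop with its two `break`s; `i < 0` = range exhausted
def pvALoop (mem : List (Option Int)) (j i : Int) : List (Option Int) :=
  if _h : i < 0 then mem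
  else if i < j then mem
  else if PySem.List.pyGetD mem i none ≠ none then
    let j' := pvAWhile mem i j
    if PySem.List.pyGetD mem j' none ≠ none then mem
    else pvALoop (PySem.List.pySetD (PySem.List.pySetD mem j' (PySem.List.pyGetD mem i none)) i none) j' (i - 1)
  else pvALoop mem j (i - 1)
termination_by (i + 1).toNat
decreasing_by all_goals omega

def defrag_memory (memory : List (Option Int)) : List (Option Int) :=
  pvALoop memory 0 ((memory.length : Int) - 1)

-- ===== PORT B =====
-- the `for g, b in zip(gaps, blocks)` loop with its `break`
def pvMovePairs (mem : List (Option Int)) : List (Int × Int) → List (Option Int)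
  | [] => mem
  | (g, b) :: rest =>
    if g ≥ b then mem
    else pvMovePairs (PySem.List.pySetD (PySem.List.pySetD mem g (PySem.List.pyGetD mem b none)) b none) rest

def defrag_memory_alt (memory : List (Option Int)) : List (Option Int) :=
  let gaps := (PySem.List.enumerate memory 0).filterMap (fun p => if p.2 = none then some p.1 else none)
  let blocks := ((PySem.List.enumerate memory 0).filterMap (fun p => if p.2 ≠ none then some p.1 else none)).reverse
  pvMovePairs memory (gaps.zip blocks)

-- ===== PRECONDITION & SPEC =====
def Spec_defrag_memory (memory : List (Option Int)) (out : List (Option Int)) : Prop := out = defrag_memory_alt memory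
instance (memory : List (Option Int)) (out : List (Option Int)) : Decidable (Spec_defrag_memory memory out) := by unfold Spec_defrag_memory; infer_instance

-- ===== CLAIM (what is proved, stated in full; the proofs are below) =====
def Claim_equal_defrag_memory : Prop := ∀ (memory : List (Option Int)), Dom_defrag_memory memory → Spec_defrag_memory memory (defrag_memory memory)

-- ===== LEMMAS AND PROOFS =====

-- shorthand used only by the proofs
def pvGaps (mem : List (Option Int)) (a b : Int) : List Int :=
  (PySem.List.pyRange a b 1).filter (fun p => decide (PySem.List.pyGetD mem p none = none))

-- ---- in-range Int indexing bridges ----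

theorem pvGet_nonneg (mem : List (Option Int)) (p : Int) (hp : 0 ≤ p) :
    PySem.List.pyGetD mem p none = mem.getD p.toNat none := by
  simp [PySem.List.pyGetD, PySem.List.pyGet?_of_nonneg _ hp, List.getD]

theorem pvGet_setD_ne (mem : List (Option Int)) (p q : Int) (v : Option Int)
    (hp : 0 ≤ p) (hq : 0 ≤ q) (hne : p ≠ q) :
    PySem.List.pyGetD (PySem.List.pySetD mem p v) q none = PySem.List.pyGetD mem q none := by
  rw [PySem.List.pySetD_of_nonneg mem v hp, pvGet_nonneg _ _ hq, pvGet_nonneg _ _ hq]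
  have : p.toNat ≠ q.toNat := by omega
  simp [List.getD, List.getElem?_set_ne this]

theorem pvGet_setD_self (mem : List (Option Int)) (p : Int) (v : Option Int)
    (hp : 0 ≤ p) (hlt : p < (mem.length : Int)) :
    PySem.List.pyGetD (PySem.List.pySetD mem p v) p none = v := by
  rw [PySem.List.pySetD_of_nonneg mem v hp, pvGet_nonneg _ _ hp]
  have : p.toNat < mem.length := by omega
  simp [List.getD, this]

-- ---- the inner while loop ----

theorem pvAWhile_gap (n : Nat) : ∀ (mem : List (Option Int)) (i g j : Int),
    (g - j).toNat = n → 0 ≤ j → j ≤ g → g < i →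
    (∀ p, j ≤ p → p < g → PySem.List.pyGetD mem p none ≠ none) →
    PySem.List.pyGetD mem g none = none →
    pvAWhile mem i j = g := by
  induction n with
  | zero =>
    intro mem i g j hn h0 hjg hgi hfil hg
    have hjg' : j = g := by omega
    rw [pvAWhile]
    simp [hjg', hg]
  | succ n ih =>
    intro mem i g j hn h0 hjg hgi hfil hg
    have hlt : j < g := by omega
    rw [pvAWhile]
    have hcond : j + 1 < i ∧ PySem.List.pyGetD mem j none ≠ none :=
      ⟨by omega, hfil j le_rfl hlt⟩
    rw [dif_pos hcond]
    exact ih mem i g (j + 1) (by omega) (by omega) (by omega) hgi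
      (fun p h1 h2 => hfil p (by omega) h2) hg

theorem pvAWhile_full (n : Nat) : ∀ (mem : List (Option Int)) (b j : Int),
    (b - 1 - j).toNat = n → 0 ≤ j → j ≤ b →
    (∀ p, j ≤ p → p < b → PySem.List.pyGetD mem p none ≠ none) →
    pvAWhile mem b j = max j (b - 1) := by
  induction n with
  | zero =>
    intro mem b j hn h0 hjb hfil
    rw [pvAWhile]
    have : ¬ (j + 1 < b ∧ PySem.List.pyGetD mem j none ≠ none) := by
      rintro ⟨h1, _⟩; omega
    rw [dif_neg this]
    omega
  | succ n ih =>
    intro mem b j hn h0 hjb hfil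
    have hlt : j < b - 1 := by omega
    rw [pvAWhile]
    have hcond : j + 1 < b ∧ PySem.List.pyGetD mem j none ≠ none :=
      ⟨by omega, hfil j le_rfl (by omega)⟩
    rw [dif_pos hcond]
    rw [ih mem b (j + 1) (by omega) (by omega) (by omega)
      (fun p h1 h2 => hfil p (by omega) h2)]
    omega

-- ---- the outer for loop: skipping and terminal segments ----

theorem pvALoop_descend (n : Nat) : ∀ (mem : List (Option Int)) (j t i : Int),
    (i - t).toNat = n → 0 ≤ t → j ≤ t → t ≤ i →
    (∀ p, t < p → p ≤ i → PySem.List.pyGetD mem p none = none) →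
    pvALoop mem j i = pvALoop mem j t := by
  induction n with
  | zero =>
    intro mem j t i hn _ _ hti _
    have : i = t := by omega
    rw [this]
  | succ n ih =>
    intro mem j t i hn h0 hjt hti hgap
    have hlt : t < i := by omega
    rw [pvALoop]
    rw [dif_neg (by omega : ¬ i < 0), if_neg (by omega : ¬ i < j)]
    rw [if_neg (by simpa using hgap i hlt le_rfl)]
    exact ih mem j t (i - 1) (by omega) h0 hjt (by omega)
      (fun p h1 h2 => hgap p h1 (by omega))

theorem pvALoop_tail (mem : List (Option Int)) (j i : Int) (h0 : 0 ≤ j)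
    (hgap : ∀ p, j < p → p ≤ i → PySem.List.pyGetD mem p none = none) :
    pvALoop mem j i = mem := by
  by_cases hij : i < j
  · rw [pvALoop]
    by_cases hneg : i < 0
    · rw [dif_pos hneg]
    · rw [dif_neg hneg, if_pos hij]
  · have hij : j ≤ i := by omega
    rw [pvALoop_descend (i - j).toNat mem j j i rfl h0 le_rfl hij hgap]
    rw [pvALoop]
    rw [dif_neg (by omega : ¬ j < 0), if_neg (by omega : ¬ j < j)]
    by_cases hj : PySem.List.pyGetD mem j none ≠ none
    · rw [if_pos hj]
      have hw : pvAWhile mem j j = j := by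
        rw [pvAWhile]
        rw [dif_neg (by rintro ⟨h1, _⟩; omega)]
      rw [hw, if_pos hj]
    · rw [if_neg hj]
      rw [pvALoop]
      by_cases hneg : j - 1 < 0
      · rw [dif_pos hneg]
      · rw [dif_neg hneg, if_pos (by omega : j - 1 < j)]

-- ---- the paired move pass: trailing pairs beyond the break point are inert ----

theorem pvAbsorb : ∀ (gs extra bs : List Int) (mem : List (Option Int)),
    (∀ g' ∈ extra, ∀ b' ∈ bs, b' ≤ g') →
    pvMovePairs mem ((gs ++ extra).zip bs) = pvMovePairs mem (gs.zip bs) := by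
  intro gs
  induction gs with
  | nil =>
    intro extra bs mem h
    cases bs with
    | nil => simp [List.zip_nil_right]
    | cons b bs' =>
      cases extra with
      | nil => rfl
      | cons g' es =>
        simp only [List.nil_append, List.zip_cons_cons, List.zip_nil_left, pvMovePairs]
        rw [if_pos (h g' (List.mem_cons_self) b (List.mem_cons_self))]
  | cons g gs' ih =>
    intro extra bs mem h
    cases bs with
    | nil => simp [List.zip_nil_right]
    | cons b bs' =>
      simp only [List.cons_append, List.zip_cons_cons, pvMovePairs]
      by_cases hgb : g ≥ b
      · rw [if_pos hgb, if_pos hgb]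
      · rw [if_neg hgb, if_neg hgb]
        exact ih extra bs' _ (fun g' hg' b' hb' => h g' hg' b' (List.mem_cons_of_mem _ hb'))

-- ---- facts about pvGaps ----

theorem pvMem_gaps (mem : List (Option Int)) (a b p : Int) :
    p ∈ pvGaps mem a b ↔ (a ≤ p ∧ p < b) ∧ PySem.List.pyGetD mem p none = none := by
  simp [pvGaps, List.mem_filter, PySem.List.mem_pyRange_one]

theorem pvGaps_append (mem : List (Option Int)) (a m b : Int) (h1 : a ≤ m) (h2 : m ≤ b) :
    pvGaps mem a b = pvGaps mem a m ++ pvGaps mem m b := by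
  rw [pvGaps, PySem.List.pyRange_one_append a m b h1 h2, List.filter_append]
  rfl

theorem pvGaps_sorted (mem : List (Option Int)) (a b : Int) :
    (pvGaps mem a b).Pairwise (· < ·) :=
  (PySem.List.pairwise_lt_pyRange_one a b).filter _

theorem pvGaps_eq_nil_of_filled (mem : List (Option Int)) (a b : Int)
    (h : ∀ p, a ≤ p → p < b → PySem.List.pyGetD mem p none ≠ none) :
    pvGaps mem a b = [] := by
  rw [List.eq_nil_iff_forall_not_mem]
  intro p hp
  rw [pvMem_gaps] at hp
  exact h p hp.1.1 hp.1.2 hp.2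

theorem pvGaps_singleton (mem : List (Option Int)) (g : Int)
    (hg : PySem.List.pyGetD mem g none = none) :
    pvGaps mem g (g + 1) = [g] := by
  rw [pvGaps, PySem.List.pyRange_one_singleton]
  simp [hg]

theorem pvGaps_congr (mem mem' : List (Option Int)) (a b : Int)
    (h : ∀ p, a ≤ p → p < b → PySem.List.pyGetD mem' p none = PySem.List.pyGetD mem p none) :
    pvGaps mem' a b = pvGaps mem a b := by
  rw [pvGaps, pvGaps]
  refine List.filter_congr ?_
  intro p hp
  rw [PySem.List.mem_pyRange_one] at hp
  rw [h p hp.1 hp.2]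

-- head of pvGaps is the least gap in the window
theorem pvGaps_head_min (mem : List (Option Int)) (a b g : Int) (t : List Int)
    (hg : pvGaps mem a b = g :: t) :
    ∀ p, a ≤ p → p < b → PySem.List.pyGetD mem p none = none → g ≤ p := by
  intro p h1 h2 h3
  have hp : p ∈ pvGaps mem a b := (pvMem_gaps mem a b p).mpr ⟨⟨h1, h2⟩, h3⟩
  rw [hg] at hp
  have hsorted := pvGaps_sorted mem a b
  rw [hg, List.pairwise_cons] at hsorted
  rcases List.mem_cons.mp hp with h | h
  · omega
  · exact le_of_lt (hsorted.1 p h)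

-- ---- enumerate/filterMap index tables are range filters ----

theorem pvGetD_cons_pos (x : Option Int) (xs : List (Option Int)) (q : Int) (h : 1 ≤ q) :
    PySem.List.pyGetD (x :: xs) q none = PySem.List.pyGetD xs (q - 1) none := by
  rw [pvGet_nonneg _ _ (by omega), pvGet_nonneg _ _ (by omega)]
  have : q.toNat = (q - 1).toNat + 1 := by omega
  rw [this]
  simp [List.getD]

theorem pvEnumFM (P : Option Int → Prop) [DecidablePred P] :
    ∀ (l : List (Option Int)) (k : Int),
    (PySem.List.enumerate l k).filterMap (fun p => if P p.2 then some p.1 else none)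
      = (PySem.List.pyRange k (k + l.length) 1).filter
          (fun i => decide (P (PySem.List.pyGetD l (i - k) none))) := by
  intro l
  induction l with
  | nil =>
    intro k
    rw [PySem.List.enumerate_nil, PySem.List.pyRange_one_eq_nil (by simp : k + (([] : List (Option Int)).length : Int) ≤ k)]
    rfl
  | cons x xs ih =>
    intro k
    rw [PySem.List.enumerate_cons]
    have hsplit : PySem.List.pyRange k (k + ((x :: xs).length : Int)) 1
        = k :: PySem.List.pyRange (k + 1) (k + ((x :: xs).length : Int)) 1 := by
      refine PySem.List.pyRange_one_cons ?_
      simp only [List.length_cons]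
      push_cast
      omega
    rw [hsplit]
    rw [List.filterMap_cons, List.filter_cons]
    have hhead : PySem.List.pyGetD (x :: xs) (k - k) none = x := by
      have : k - k = 0 := by omega
      rw [this, PySem.List.pyGetD_zero_cons]
    have htail : (PySem.List.pyRange (k + 1) (k + ((x :: xs).length : Int)) 1).filter
          (fun i => decide (P (PySem.List.pyGetD (x :: xs) (i - k) none)))
        = (PySem.List.pyRange (k + 1) ((k + 1) + (xs.length : Int)) 1).filter
          (fun i => decide (P (PySem.List.pyGetD xs (i - (k + 1)) none))) := by
      have harg : PySem.List.pyRange (k + 1) (k + ((x :: xs).length : Int)) 1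
          = PySem.List.pyRange (k + 1) ((k + 1) + (xs.length : Int)) 1 := by
        have : k + ((x :: xs).length : Int) = (k + 1) + (xs.length : Int) := by
          simp only [List.length_cons]; push_cast; omega
        rw [this]
      rw [harg]
      refine List.filter_congr ?_
      intro i hi
      rw [PySem.List.mem_pyRange_one] at hi
      rw [pvGetD_cons_pos x xs (i - k) (by omega)]
      have : i - k - 1 = i - (k + 1) := by omega
      rw [this]
    rw [htail, ← ih (k + 1), hhead]
    by_cases hP : P x
    · simp [hP]
    · simp [hP]

-- gap/block tables of B, rewritten as range filters over the whole list
theorem pvGapsTable (mem : List (Option Int)) :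
    (PySem.List.enumerate mem 0).filterMap (fun p => if p.2 = none then some p.1 else none)
      = pvGaps mem 0 (mem.length : Int) := by
  rw [pvEnumFM (fun o => o = none) mem 0, pvGaps]
  have : (0 : Int) + (mem.length : Int) = (mem.length : Int) := by omega
  rw [this]
  refine List.filter_congr ?_
  intro i _
  have : i - 0 = i := by omega
  rw [this]

theorem pvBlocksTable (mem : List (Option Int)) :
    (PySem.List.enumerate mem 0).filterMap (fun p => if p.2 ≠ none then some p.1 else none)
      = (PySem.List.pyRange 0 (mem.length : Int) 1).filter
          (fun i => decide (PySem.List.pyGetD mem i none ≠ none)) := by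
  rw [pvEnumFM (fun o => o ≠ none) mem 0]
  have : (0 : Int) + (mem.length : Int) = (mem.length : Int) := by omega
  rw [this]
  refine List.filter_congr ?_
  intro i _
  have : i - 0 = i := by omega
  rw [this]

-- ---- the main invariant ----

theorem pvMain : ∀ (bs : List Int) (mem : List (Option Int)) (j i : Int),
    0 ≤ j → i < (mem.length : Int) →
    (∀ p, 0 ≤ p → p < j → PySem.List.pyGetD mem p none ≠ none) →
    bs.Pairwise (· > ·) →
    (∀ b' ∈ bs, 0 ≤ b' ∧ b' ≤ i ∧ PySem.List.pyGetD mem b' none ≠ none) →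
    (∀ p, j ≤ p → p ≤ i → PySem.List.pyGetD mem p none ≠ none → p ∈ bs ∨ p = j) →
    pvALoop mem j i = pvMovePairs mem ((pvGaps mem j (i + 1)).zip bs) := by
  intro bs
  induction bs with
  | nil =>
    intro mem j i h0 hlen hpref hdesc hmem hcomp
    rw [List.zip_nil_right]
    show pvALoop mem j i = pvMovePairs mem []
    rw [pvMovePairs]
    refine pvALoop_tail mem j i h0 ?_
    intro p h1 h2
    by_contra hfil
    rcases hcomp p (by omega) h2 hfil with h | h
    · exact absurd h (List.not_mem_nil)
    · omega
  | cons b rest ih =>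
    intro mem j i h0 hlen hpref hdesc hmem hcomp
    obtain ⟨hb0, hbi, hbfil⟩ := hmem b List.mem_cons_self
    have hrest_lt : ∀ b' ∈ rest, b' < b := by
      intro b' hb'
      exact (List.pairwise_cons.mp hdesc).1 b' hb'
    by_cases hbj : b < j
    · -- every block sits below j: the scan runs dry, the first pair breaks
      have htail : ∀ p, j < p → p ≤ i → PySem.List.pyGetD mem p none = none := by
        intro p h1 h2
        by_contra hfil
        rcases hcomp p (by omega) h2 hfil with h | h
        · rcases List.mem_cons.mp h with h | h
          · omega
          · have := hrest_lt p h; omega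
        · omega
      rw [pvALoop_tail mem j i h0 htail]
      cases hg : pvGaps mem j (i + 1) with
      | nil => rw [List.zip_nil_left, pvMovePairs]
      | cons g t =>
        have hgmem : g ∈ pvGaps mem j (i + 1) := by rw [hg]; exact List.mem_cons_self
        rw [pvMem_gaps] at hgmem
        rw [List.zip_cons_cons, pvMovePairs, if_pos (by omega : g ≥ b)]
    · have hbj : j ≤ b := by omega
      -- positions above the top block are gaps
      have habove : ∀ p, b < p → p ≤ i → PySem.List.pyGetD mem p none = none := by
        intro p h1 h2
        by_contra hfil
        rcases hcomp p (by omega) h2 hfil with h | h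
        · rcases List.mem_cons.mp h with h | h
          · omega
          · have := hrest_lt p h; omega
        · omega
      rw [pvALoop_descend (i - b).toNat mem j b i rfl hb0 hbj hbi habove]
      -- the gap table splits at b+1; the tail pairs are inert
      rw [pvGaps_append mem j (b + 1) (i + 1) (by omega) (by omega)]
      rw [pvAbsorb _ _ _ mem ?_]
      swap
      · intro g' hg' b' hb'
        rw [pvMem_gaps] at hg'
        rcases List.mem_cons.mp hb' with h | h
        · omega
        · have := hrest_lt b' h; omega
      cases hg : pvGaps mem j (b + 1) with
      | nil =>
        -- no gap left of b: the while-scan parks on a filled cell and A breaks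
        have hfull : ∀ p, j ≤ p → p ≤ b → PySem.List.pyGetD mem p none ≠ none := by
          intro p h1 h2 hgap
          have : p ∈ pvGaps mem j (b + 1) := (pvMem_gaps _ _ _ _).mpr ⟨⟨h1, by omega⟩, hgap⟩
          rw [hg] at this
          exact absurd this (List.not_mem_nil)
        rw [pvALoop]
        rw [dif_neg (by omega : ¬ b < 0), if_neg (by omega : ¬ b < j), if_pos hbfil]
        rw [pvAWhile_full (b - 1 - j).toNat mem b j rfl h0 hbj
          (fun p h1 h2 => hfull p h1 (by omega))]
        rw [if_pos (hfull (max j (b - 1)) (by omega) (by omega))]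
        rw [List.zip_nil_left, pvMovePairs]
      | cons g t =>
        have hgmem : g ∈ pvGaps mem j (b + 1) := by rw [hg]; exact List.mem_cons_self
        rw [pvMem_gaps] at hgmem
        obtain ⟨⟨hjg, hgb1⟩, hggap⟩ := hgmem
        have hgb : g < b := by
          rcases lt_or_eq_of_le (by omega : g ≤ b) with h | h
          · exact h
          · rw [h] at hggap; exact absurd hggap hbfil
        have hmin := pvGaps_head_min mem j (b + 1) g t hg
        have hleft : ∀ p, j ≤ p → p < g → PySem.List.pyGetD mem p none ≠ none := by
          intro p h1 h2 hgap
          have := hmin p h1 (by omega) hgap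
          omega
        -- A performs exactly the move B performs for the pair (g, b)
        rw [pvALoop]
        rw [dif_neg (by omega : ¬ b < 0), if_neg (by omega : ¬ b < j), if_pos hbfil]
        rw [pvAWhile_gap (g - j).toNat mem b g j rfl h0 hjg hgb hleft hggap]
        rw [if_neg (by simpa using hggap)]
        rw [List.zip_cons_cons, pvMovePairs, if_neg (by omega : ¬ g ≥ b)]
        set mem' := PySem.List.pySetD (PySem.List.pySetD mem g (PySem.List.pyGetD mem b none)) b none with hmem'
        have hlen' : (mem'.length : Int) = (mem.length : Int) := by
          rw [hmem']; simp [PySem.List.length_pySetD]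
        have hget' : ∀ p, 0 ≤ p → p ≠ g → p ≠ b →
            PySem.List.pyGetD mem' p none = PySem.List.pyGetD mem p none := by
          intro p hp hpg hpb
          rw [hmem', pvGet_setD_ne _ _ _ _ hb0 hp (by omega),
            pvGet_setD_ne _ _ _ _ (by omega) hp (by omega)]
        have hgetg : PySem.List.pyGetD mem' g none = PySem.List.pyGetD mem b none := by
          rw [hmem', pvGet_setD_ne _ _ _ _ hb0 (by omega) (by omega)]
          rw [pvGet_setD_self _ _ _ (by omega) (by omega)]
        -- the remaining gap table of the mutated memory is exactly the tail t
        have ht : t = pvGaps mem (g + 1) (b + 1) := by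
          have hsplit : pvGaps mem j (b + 1)
              = pvGaps mem j g ++ pvGaps mem g (g + 1) ++ pvGaps mem (g + 1) (b + 1) := by
            rw [← pvGaps_append mem j g (g + 1) (by omega) (by omega),
              ← pvGaps_append mem j (g + 1) (b + 1) (by omega) (by omega)]
          rw [pvGaps_eq_nil_of_filled mem j g hleft, List.nil_append,
            pvGaps_singleton mem g hggap] at hsplit
          rw [hg] at hsplit
          exact (List.cons_eq_cons.mp hsplit).2
        have hgaps' : pvGaps mem' g b = t := by
          rw [pvGaps_append mem' g (g + 1) b (by omega) (by omega)]
          rw [pvGaps_eq_nil_of_filled mem' g (g + 1)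
            (by intro p h1 h2
                have : p = g := by omega
                rw [this, hgetg]
                exact hbfil)]
          rw [List.nil_append, ht,
            pvGaps_congr mem mem' (g + 1) b (fun p h1 h2 => hget' p (by omega) (by omega) (by omega)),
            pvGaps_append mem (g + 1) b (b + 1) (by omega) (by omega),
            pvGaps_eq_nil_of_filled mem b (b + 1)
              (by intro p h1 h2
                  have : p = b := by omega
                  rw [this]; exact hbfil),
            List.append_nil]
        -- recurse on the remaining blocks
        have hrec := ih mem' g (b - 1) (by omega) (by omega)
          (by intro p hp hpg
              rw [hget' p hp (by omega) (by omega)]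
              by_cases hpj : p < j
              · exact hpref p hp hpj
              · exact hleft p (by omega) hpg)
          (List.pairwise_cons.mp hdesc).2
          (by intro b' hb'
              have hb'b := hrest_lt b' hb'
              obtain ⟨h1, _, h3⟩ := hmem b' (List.mem_cons_of_mem _ hb')
              refine ⟨h1, by omega, ?_⟩
              have hb'g : b' ≠ g := by
                intro h; rw [h] at h3; exact h3 hggap
              rw [hget' b' h1 hb'g (by omega)]
              exact h3)
          (by intro p h1 h2 hfil
              by_cases hpg : p = g
              · right; exact hpg
              · left
                rw [hget' p (by omega) hpg (by omega)] at hfil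
                rcases hcomp p (by omega) (by omega) hfil with h | h
                · rcases List.mem_cons.mp h with h | h
                  · omega
                  · exact h
                · omega)
        have hb1 : b - 1 + 1 = b := by omega
        rw [hb1, hgaps'] at hrec
        exact hrec

-- ===== VERDICT (by name: the statement is the Claim_ definition above) =====
theorem defrag_memory_spec : Claim_equal_defrag_memory := by
  intro memory _
  unfold Spec_defrag_memory defrag_memory defrag_memory_alt
  rw [pvGapsTable, pvBlocksTable]
  have hlast : (memory.length : Int) - 1 + 1 = (memory.length : Int) := by omega
  have hblocks :
      ((PySem.List.pyRange 0 (memory.length : Int) 1).filter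
        (fun i => decide (PySem.List.pyGetD memory i none ≠ none))).reverse.Pairwise (· > ·) := by
    rw [List.pairwise_reverse]
    exact (PySem.List.pairwise_lt_pyRange_one 0 (memory.length : Int)).filter _
  rw [pvMain _ memory 0 ((memory.length : Int) - 1) le_rfl (by omega)
    (by intro p h1 h2; omega)
    hblocks
    (by intro b' hb'
        rw [List.mem_reverse, List.mem_filter, PySem.List.mem_pyRange_one] at hb'
        refine ⟨hb'.1.1, by omega, by simpa using hb'.2⟩)
    (by intro p h1 h2 hfil
        left
        rw [List.mem_reverse, List.mem_filter, PySem.List.mem_pyRange_one]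
        exact ⟨⟨h1, by omega⟩, by simpa using hfil⟩)]
  rw [hlast]
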